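-- pv_equiv track=rewrite | github.com/Mjh9122/Eulers | completed/684.py | by_nines_sum
-- ===== SOURCE A (Python) =====
-- p = 1_000_000_007
--
-- def mod_min_dig_sum(x):
--     y = (x // 9) % p
--     z = x % 9
--     total = (z * (10 ** y)% p)
--     total += (10 ** y - 1) % p
--     return total % p
--
-- def by_nines_sum(x):
--     n = (x // 9) % p
--     left = x % 9
--     num = 0
--     if n > 0:
--         num = (6 * (10 ** n) )%p - (6 + (9 * n) % p)
--     for i in range(x-left + 1, x+ 1):
--         num += mod_min_dig_sum(i)
--         num %= p
--     return num % p
-- ===== SOURCE B (Python) =====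
-- p = 1_000_000_007
--
-- def by_nines_sum(x):
--     n = (x // 9) % p
--     left = x % 9
--     t = pow(10, n, p)
--     num = (6 * t - 6 - 9 * n) if n > 0 else 0
--     num += t * (left * (left + 1) // 2) + left * (t - 1)
--     return num % p
-- ===== Notes on version B (the rewrite author's own statement) =====
-- stated objective: faster
-- what changed: The per-digit loop over the last partial block of nine (each iteration recomputing a huge exact power of ten) is replaced by a closed-form arithmetic-series sum, and every exact big-integer power of ten is replaced by built-in three-argument modular pow.
-- outside the precondition, e.g. on by_nines_sum(-1): A does not finish within the time limit, B returns 45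
import Mathlib
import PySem

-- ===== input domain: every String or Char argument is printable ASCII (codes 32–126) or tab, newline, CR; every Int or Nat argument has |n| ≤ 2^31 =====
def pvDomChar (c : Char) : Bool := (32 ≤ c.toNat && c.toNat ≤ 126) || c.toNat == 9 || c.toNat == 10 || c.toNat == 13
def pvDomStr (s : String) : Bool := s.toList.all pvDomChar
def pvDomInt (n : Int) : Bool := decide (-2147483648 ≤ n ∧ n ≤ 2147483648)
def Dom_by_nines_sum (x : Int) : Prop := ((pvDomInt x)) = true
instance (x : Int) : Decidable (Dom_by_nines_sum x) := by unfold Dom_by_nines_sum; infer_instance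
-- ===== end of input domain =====

-- B replaces A's loop of huge exact powers 10**n by a closed-form sum with modular
-- exponentiation (objective: faster; measured).

-- ===== PORT A =====
-- Python's `10 ** y` with y = (_ // 9) % 1000000007 ≥ 0: ported as 10 ^ y.toNat (y is
-- always nonnegative since the modulus is positive, so toNat is exact here).
def mod_min_dig_sum (x : Int) : Int :=
  let y := PySem.Int.mod (PySem.Int.floordiv x 9) 1000000007
  let z := PySem.Int.mod x 9
  let total := PySem.Int.mod (z * 10 ^ y.toNat) 1000000007
  let total := total + PySem.Int.mod (10 ^ y.toNat - 1) 1000000007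
  PySem.Int.mod total 1000000007

def by_nines_sum (x : Int) : Int :=
  let n := PySem.Int.mod (PySem.Int.floordiv x 9) 1000000007
  let left := PySem.Int.mod x 9
  let num : Int :=
    if n > 0 then PySem.Int.mod (6 * 10 ^ n.toNat) 1000000007 - (6 + PySem.Int.mod (9 * n) 1000000007)
    else 0
  let num := (PySem.List.pyRange (x - left + 1) (x + 1) 1).foldl
      (fun num i => PySem.Int.mod (num + mod_min_dig_sum i) 1000000007) num
  PySem.Int.mod num 1000000007

-- ===== PORT B =====
-- `pow(10, n, p)` is PySem.Int.powMod (n ≥ 0, so n.toNat is exact).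
def by_nines_sum_alt (x : Int) : Int :=
  let n := PySem.Int.mod (PySem.Int.floordiv x 9) 1000000007
  let left := PySem.Int.mod x 9
  let t := PySem.Int.powMod 10 n.toNat 1000000007
  let num : Int := if n > 0 then 6 * t - 6 - 9 * n else 0
  let num := num + t * PySem.Int.floordiv (left * (left + 1)) 2 + left * (t - 1)
  PySem.Int.mod num 1000000007

-- ===== PRECONDITION & SPEC =====
-- Pre_ excludes negative x: there the floor-division quotient reduced by the positive prime
-- modulus is huge, so A attempts to build that exact power of ten (about a billion digits)
-- and does not return in practice.
def Pre_by_nines_sum (x : Int) : Prop := 0 ≤ x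
instance (x : Int) : Decidable (Pre_by_nines_sum x) := by unfold Pre_by_nines_sum; infer_instance
def pvWitness_by_nines_sum : Int := (10)

def Spec_by_nines_sum (x : Int) (out : Int) : Prop := out = by_nines_sum_alt x
instance (x : Int) (out : Int) : Decidable (Spec_by_nines_sum x out) := by unfold Spec_by_nines_sum; infer_instance

-- ===== CLAIM (what is proved, stated in full; the proofs are below) =====
def Claim_equal_by_nines_sum : Prop := ∀ (x : Int), Dom_by_nines_sum x → Pre_by_nines_sum x → Spec_by_nines_sum x (by_nines_sum x)

-- ===== LEMMAS AND PROOFS =====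

lemma pv_cast_emod (a : Int) : ((a % 1000000007 : Int) : ZMod 1000000007) = (a : ZMod 1000000007) := by
  have h := ZMod.intCast_mod a 1000000007
  simpa using h

lemma pv_emod_eq_of_cast (a b : Int) (h : (a : ZMod 1000000007) = (b : ZMod 1000000007)) :
    a % 1000000007 = b % 1000000007 := by
  have h2 := (ZMod.intCast_eq_intCast_iff a b 1000000007).mp h
  simpa [Int.ModEq] using h2

lemma pv_mds_val (q k : Int) (hq : 0 ≤ q) (hqp : q < 1000000007) (hk : 0 ≤ k) (hk8 : k < 8) :
    mod_min_dig_sum (9 * q + 1 + k) =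
      (((k + 1) * 10 ^ q.toNat) % 1000000007 + (10 ^ q.toNat - 1) % 1000000007) % 1000000007 := by
  have hmodP : ∀ a : Int, PySem.Int.mod a 1000000007 = a % 1000000007 :=
    fun a => PySem.Int.mod_eq_emod_of_pos (by norm_num)
  have hmod9 : ∀ a : Int, PySem.Int.mod a 9 = a % 9 :=
    fun a => PySem.Int.mod_eq_emod_of_pos (by norm_num)
  have hdiv9 : ∀ a : Int, PySem.Int.floordiv a 9 = a / 9 :=
    fun a => PySem.Int.floordiv_eq_ediv_of_pos (by norm_num)
  have h1 : (9 * q + 1 + k) / 9 = q := by omega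
  have h2 : (9 * q + 1 + k) % 9 = k + 1 := by omega
  have h3 : q % 1000000007 = q := by omega
  unfold mod_min_dig_sum
  simp only [hmodP, hmod9, hdiv9, h1, h2, h3]

lemma pv_main (q r : Int) (hq : 0 ≤ q) (hqp : q < 1000000007) (hr : 0 ≤ r) (hr9 : r < 9) :
    by_nines_sum (9 * q + r) = by_nines_sum_alt (9 * q + r) := by
  have hmodP : ∀ a : Int, PySem.Int.mod a 1000000007 = a % 1000000007 :=
    fun a => PySem.Int.mod_eq_emod_of_pos (by norm_num)
  have hmod9 : ∀ a : Int, PySem.Int.mod a 9 = a % 9 :=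
    fun a => PySem.Int.mod_eq_emod_of_pos (by norm_num)
  have hdiv9 : ∀ a : Int, PySem.Int.floordiv a 9 = a / 9 :=
    fun a => PySem.Int.floordiv_eq_ediv_of_pos (by norm_num)
  have hdiv2 : ∀ a : Int, PySem.Int.floordiv a 2 = a / 2 :=
    fun a => PySem.Int.floordiv_eq_ediv_of_pos (by norm_num)
  have h1 : (9 * q + r) / 9 = q := by omega
  have h2 : (9 * q + r) % 9 = r := by omega
  have h3 : q % 1000000007 = q := by omega
  have hrange : 9 * q + r - r + 1 = 9 * q + 1 := by ring
  have mc : ∀ kk : ℤ, 0 ≤ kk → kk < 8 →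
      ((mod_min_dig_sum (9 * q + 1 + kk) : ℤ) : ZMod 1000000007) =
        ((kk : ZMod 1000000007) + 1) * 10 ^ q.toNat + (10 ^ q.toNat - 1) := by
    intro kk h0 h8
    rw [pv_mds_val q kk hq hqp h0 h8]
    push_cast [pv_cast_emod]
    ring
  have mc0 : ((mod_min_dig_sum (9 * q + 1) : ℤ) : ZMod 1000000007) =
      (1 : ZMod 1000000007) * 10 ^ q.toNat + (10 ^ q.toNat - 1) := by
    rw [show (9 * q + 1 : ℤ) = 9 * q + 1 + 0 from by ring,
        pv_mds_val q 0 hq hqp (by norm_num) (by norm_num)]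
    push_cast [pv_cast_emod]
    ring
  unfold by_nines_sum by_nines_sum_alt
  simp only [hmodP, hmod9, hdiv9, hdiv2, h1, h2, h3, PySem.Int.powMod_eq, hrange]
  interval_cases r
  · -- r = 0
    simp only [PySem.List.pyRange_one]
    rw [show (9 * q + 0 + 1 - (9 * q + 1) : ℤ) = (0 : ℤ) from by ring,
        show ((0 : ℤ) * (0 + 1)) / 2 = (0 : ℤ) from by norm_num]
    simp only [Int.reduceToNat, List.range_succ, List.range_zero,
      List.map_append, List.map_cons, List.map_nil, List.nil_append, List.cons_append,
      List.append_nil, List.foldl_append, List.foldl_cons, List.foldl_nil,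
      Nat.cast_zero, Nat.cast_one, Nat.cast_ofNat, add_zero]
    by_cases hq0 : q > 0 <;>
      simp only [hq0, if_true, if_false, reduceIte] <;>
      apply pv_emod_eq_of_cast <;>
    · push_cast [pv_cast_emod]
      ring

  · -- r = 1
    simp only [PySem.List.pyRange_one]
    rw [show (9 * q + 1 + 1 - (9 * q + 1) : ℤ) = (1 : ℤ) from by ring,
        show ((1 : ℤ) * (1 + 1)) / 2 = (1 : ℤ) from by norm_num]
    simp only [Int.reduceToNat, List.range_succ, List.range_zero,
      List.map_append, List.map_cons, List.map_nil, List.nil_append, List.cons_append,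
      List.append_nil, List.foldl_append, List.foldl_cons, List.foldl_nil,
      Nat.cast_zero, Nat.cast_one, Nat.cast_ofNat, add_zero]
    by_cases hq0 : q > 0 <;>
      simp only [hq0, if_true, if_false, reduceIte] <;>
      apply pv_emod_eq_of_cast <;>
    · push_cast [pv_cast_emod]
      rw [mc0]
      ring

  · -- r = 2
    simp only [PySem.List.pyRange_one]
    rw [show (9 * q + 2 + 1 - (9 * q + 1) : ℤ) = (2 : ℤ) from by ring,
        show ((2 : ℤ) * (2 + 1)) / 2 = (3 : ℤ) from by norm_num]
    simp only [Int.reduceToNat, List.range_succ, List.range_zero,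
      List.map_append, List.map_cons, List.map_nil, List.nil_append, List.cons_append,
      List.append_nil, List.foldl_append, List.foldl_cons, List.foldl_nil,
      Nat.cast_zero, Nat.cast_one, Nat.cast_ofNat, add_zero]
    by_cases hq0 : q > 0 <;>
      simp only [hq0, if_true, if_false, reduceIte] <;>
      apply pv_emod_eq_of_cast <;>
    · push_cast [pv_cast_emod]
      rw [mc0, mc 1 (by norm_num) (by norm_num)]
      ring

  · -- r = 3
    simp only [PySem.List.pyRange_one]
    rw [show (9 * q + 3 + 1 - (9 * q + 1) : ℤ) = (3 : ℤ) from by ring,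
        show ((3 : ℤ) * (3 + 1)) / 2 = (6 : ℤ) from by norm_num]
    simp only [Int.reduceToNat, List.range_succ, List.range_zero,
      List.map_append, List.map_cons, List.map_nil, List.nil_append, List.cons_append,
      List.append_nil, List.foldl_append, List.foldl_cons, List.foldl_nil,
      Nat.cast_zero, Nat.cast_one, Nat.cast_ofNat, add_zero]
    by_cases hq0 : q > 0 <;>
      simp only [hq0, if_true, if_false, reduceIte] <;>
      apply pv_emod_eq_of_cast <;>
    · push_cast [pv_cast_emod]
      rw [mc0, mc 1 (by norm_num) (by norm_num), mc 2 (by norm_num) (by norm_num)]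
      ring

  · -- r = 4
    simp only [PySem.List.pyRange_one]
    rw [show (9 * q + 4 + 1 - (9 * q + 1) : ℤ) = (4 : ℤ) from by ring,
        show ((4 : ℤ) * (4 + 1)) / 2 = (10 : ℤ) from by norm_num]
    simp only [Int.reduceToNat, List.range_succ, List.range_zero,
      List.map_append, List.map_cons, List.map_nil, List.nil_append, List.cons_append,
      List.append_nil, List.foldl_append, List.foldl_cons, List.foldl_nil,
      Nat.cast_zero, Nat.cast_one, Nat.cast_ofNat, add_zero]
    by_cases hq0 : q > 0 <;>
      simp only [hq0, if_true, if_false, reduceIte] <;>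
      apply pv_emod_eq_of_cast <;>
    · push_cast [pv_cast_emod]
      rw [mc0, mc 1 (by norm_num) (by norm_num), mc 2 (by norm_num) (by norm_num), mc 3 (by norm_num) (by norm_num)]
      ring

  · -- r = 5
    simp only [PySem.List.pyRange_one]
    rw [show (9 * q + 5 + 1 - (9 * q + 1) : ℤ) = (5 : ℤ) from by ring,
        show ((5 : ℤ) * (5 + 1)) / 2 = (15 : ℤ) from by norm_num]
    simp only [Int.reduceToNat, List.range_succ, List.range_zero,
      List.map_append, List.map_cons, List.map_nil, List.nil_append, List.cons_append,
      List.append_nil, List.foldl_append, List.foldl_cons, List.foldl_nil,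
      Nat.cast_zero, Nat.cast_one, Nat.cast_ofNat, add_zero]
    by_cases hq0 : q > 0 <;>
      simp only [hq0, if_true, if_false, reduceIte] <;>
      apply pv_emod_eq_of_cast <;>
    · push_cast [pv_cast_emod]
      rw [mc0, mc 1 (by norm_num) (by norm_num), mc 2 (by norm_num) (by norm_num), mc 3 (by norm_num) (by norm_num), mc 4 (by norm_num) (by norm_num)]
      ring

  · -- r = 6
    simp only [PySem.List.pyRange_one]
    rw [show (9 * q + 6 + 1 - (9 * q + 1) : ℤ) = (6 : ℤ) from by ring,
        show ((6 : ℤ) * (6 + 1)) / 2 = (21 : ℤ) from by norm_num]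
    simp only [Int.reduceToNat, List.range_succ, List.range_zero,
      List.map_append, List.map_cons, List.map_nil, List.nil_append, List.cons_append,
      List.append_nil, List.foldl_append, List.foldl_cons, List.foldl_nil,
      Nat.cast_zero, Nat.cast_one, Nat.cast_ofNat, add_zero]
    by_cases hq0 : q > 0 <;>
      simp only [hq0, if_true, if_false, reduceIte] <;>
      apply pv_emod_eq_of_cast <;>
    · push_cast [pv_cast_emod]
      rw [mc0, mc 1 (by norm_num) (by norm_num), mc 2 (by norm_num) (by norm_num), mc 3 (by norm_num) (by norm_num), mc 4 (by norm_num) (by norm_num), mc 5 (by norm_num) (by norm_num)]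
      ring

  · -- r = 7
    simp only [PySem.List.pyRange_one]
    rw [show (9 * q + 7 + 1 - (9 * q + 1) : ℤ) = (7 : ℤ) from by ring,
        show ((7 : ℤ) * (7 + 1)) / 2 = (28 : ℤ) from by norm_num]
    simp only [Int.reduceToNat, List.range_succ, List.range_zero,
      List.map_append, List.map_cons, List.map_nil, List.nil_append, List.cons_append,
      List.append_nil, List.foldl_append, List.foldl_cons, List.foldl_nil,
      Nat.cast_zero, Nat.cast_one, Nat.cast_ofNat, add_zero]
    by_cases hq0 : q > 0 <;>
      simp only [hq0, if_true, if_false, reduceIte] <;>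
      apply pv_emod_eq_of_cast <;>
    · push_cast [pv_cast_emod]
      rw [mc0, mc 1 (by norm_num) (by norm_num), mc 2 (by norm_num) (by norm_num), mc 3 (by norm_num) (by norm_num), mc 4 (by norm_num) (by norm_num), mc 5 (by norm_num) (by norm_num), mc 6 (by norm_num) (by norm_num)]
      ring

  · -- r = 8
    simp only [PySem.List.pyRange_one]
    rw [show (9 * q + 8 + 1 - (9 * q + 1) : ℤ) = (8 : ℤ) from by ring,
        show ((8 : ℤ) * (8 + 1)) / 2 = (36 : ℤ) from by norm_num]
    simp only [Int.reduceToNat, List.range_succ, List.range_zero,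
      List.map_append, List.map_cons, List.map_nil, List.nil_append, List.cons_append,
      List.append_nil, List.foldl_append, List.foldl_cons, List.foldl_nil,
      Nat.cast_zero, Nat.cast_one, Nat.cast_ofNat, add_zero]
    by_cases hq0 : q > 0 <;>
      simp only [hq0, if_true, if_false, reduceIte] <;>
      apply pv_emod_eq_of_cast <;>
    · push_cast [pv_cast_emod]
      rw [mc0, mc 1 (by norm_num) (by norm_num), mc 2 (by norm_num) (by norm_num), mc 3 (by norm_num) (by norm_num), mc 4 (by norm_num) (by norm_num), mc 5 (by norm_num) (by norm_num), mc 6 (by norm_num) (by norm_num), mc 7 (by norm_num) (by norm_num)]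
      ring

-- ===== VERDICT (by name: the statement is the Claim_ definition above) =====
theorem by_nines_sum_spec : Claim_equal_by_nines_sum := by
  intro x hdom hpre
  unfold Spec_by_nines_sum
  unfold Dom_by_nines_sum pvDomInt at hdom
  unfold Pre_by_nines_sum at hpre
  have hb : x ≤ 2147483648 := by simpa using of_decide_eq_true hdom |>.2
  have hx : x = 9 * (x / 9) + x % 9 := by omega
  rw [hx]
  exact pv_main (x / 9) (x % 9) (by omega) (by omega) (by omega) (by omega)
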